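-- pv_equiv track=rewrite | github.com/nicoalexkasper/Projekt-NLP-Technik | Projekt.py | removeSpecialChars
-- ===== SOURCE A (Python) =====
-- def removeSpecialChars(sentence):                                                                                                                                           #Entfernung von speziellen Zeichen ("e-mail" -> "email")
--         tempSentence = ""
--         for chars in sentence:
--             if chars.isalpha():
--                 tempSentence += chars
--             elif chars == "-":
--                 break
--             else:
--                 tempSentence +=" "
--         return tempSentence
-- ===== SOURCE B (Python) =====
-- def removeSpecialChars(sentence):
--     prefix, _, _ = sentence.partition("-")
--     return "".join(c if c.isalpha() else " " for c in prefix)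
-- ===== Notes on version B (the rewrite author's own statement) =====
-- stated objective: idiomatic
-- what changed: Replaces the fused accumulate-loop-with-break by a two-stage pipeline: truncate at the first dash with str.partition, then map each char to itself or a space in a join over a generator.
import Mathlib
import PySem

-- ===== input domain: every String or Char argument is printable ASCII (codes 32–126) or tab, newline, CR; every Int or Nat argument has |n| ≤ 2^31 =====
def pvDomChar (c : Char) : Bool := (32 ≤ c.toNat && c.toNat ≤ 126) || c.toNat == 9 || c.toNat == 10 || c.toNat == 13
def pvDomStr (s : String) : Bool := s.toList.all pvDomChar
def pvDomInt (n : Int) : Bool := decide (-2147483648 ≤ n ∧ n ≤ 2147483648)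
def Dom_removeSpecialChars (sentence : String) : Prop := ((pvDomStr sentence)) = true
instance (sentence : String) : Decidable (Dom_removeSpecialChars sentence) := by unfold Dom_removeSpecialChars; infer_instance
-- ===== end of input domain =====

-- B replaces A's fused loop-with-break by an idiomatic truncate-at-dash then map-to-letter-or-space pipeline; same cost.

-- ===== PORT A =====
-- A's for-loop with break, transliterated as structural recursion over the chars with the string accumulator.
def removeSpecialCharsGo (acc : List Char) : List Char → List Char
  | [] => acc
  | c :: cs =>
    if PySem.Chars.isalpha c then removeSpecialCharsGo (acc ++ [c]) cs
    else if c == '-' then acc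
    else removeSpecialCharsGo (acc ++ [' ']) cs

def removeSpecialChars (sentence : String) : String :=
  String.ofList (removeSpecialCharsGo [] sentence.toList)

-- ===== PORT B =====
-- Source B: prefix = sentence.partition("-")[0]; ''.join(c if c.isalpha() else ' ' for c in prefix)
def removeSpecialChars_alt (sentence : String) : String :=
  String.ofList (((sentence.toList.takeWhile (fun c => c != '-')).map
    (fun c => if PySem.Chars.isalpha c then c else ' ')))

-- ===== PRECONDITION & SPEC =====
def Spec_removeSpecialChars (sentence : String) (out : String) : Prop := out = removeSpecialChars_alt sentence
instance (sentence : String) (out : String) : Decidable (Spec_removeSpecialChars sentence out) := by unfold Spec_removeSpecialChars; infer_instance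

-- ===== CLAIM (what is proved, stated in full; the proofs are below) =====
def Claim_equal_removeSpecialChars : Prop := ∀ (sentence : String), Dom_removeSpecialChars sentence → Spec_removeSpecialChars sentence (removeSpecialChars sentence)

-- ===== LEMMAS AND PROOFS =====
theorem isalpha_ne_dash (c : Char) (h : PySem.Chars.isalpha c = true) : (c != '-') = true := by
  by_contra hne
  have : c = '-' := by
    simpa using hne
  subst this
  revert h
  decide

theorem removeSpecialCharsGo_eq (l : List Char) : ∀ acc,
    removeSpecialCharsGo acc l =
      acc ++ (l.takeWhile (fun c => c != '-')).map (fun c => if PySem.Chars.isalpha c then c else ' ') := by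
  induction l with
  | nil => intro acc; simp [removeSpecialCharsGo]
  | cons c cs ih =>
    intro acc
    by_cases ha : PySem.Chars.isalpha c = true
    · have hd := isalpha_ne_dash c ha
      simp [removeSpecialCharsGo, ha, hd, ih]
    · by_cases hdash : c = '-'
      · subst hdash
        simp [removeSpecialCharsGo, ha]
      · have hd : (c != '-') = true := by simpa using hdash
        simp [removeSpecialCharsGo, ha, hdash, hd, ih]

-- ===== VERDICT (by name: the statement is the Claim_ definition above) =====
theorem removeSpecialChars_spec : Claim_equal_removeSpecialChars := by
  intro sentence _
  unfold Spec_removeSpecialChars removeSpecialChars removeSpecialChars_alt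
  rw [removeSpecialCharsGo_eq]
  simp
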